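-- pv_equiv track=rewrite | github.com/embohpokoke/sijibintaro | dashboard_api.py | get_sla_days
-- ===== SOURCE A (Python) =====
-- def get_sla_days(service_name: str) -> int:
--     """Return SLA benchmark in days based on service type keyword."""
--     if not service_name:
--         return 3
--     s = service_name.lower()
--     if any(k in s for k in ['express', '24jam', '24 jam', 'kilat']):
--         return 1
--     if any(k in s for k in ['karpet', 'gordyn', 'gordin', 'kasur', 'sofa']):
--         return 8
--     if any(k in s for k in ['tas', 'bag']):
--         return 7
--     if any(k in s for k in ['sepatu', 'shoes', 'shoe']):
--         return 5
--     if any(k in s for k in ['reguler', 'setrika', 'laundry']):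
--         return 3
--     return 3
-- ===== SOURCE B (Python) =====
-- # Single left-to-right scan of the lowered string: at each position test which
-- # keywords start there (startswith) and keep the smallest tier priority seen;
-- # map the winning priority to its SLA days at the end.  The tier with
-- # 'reguler'/'setrika'/'laundry' maps to the default 3 and needs no entry.
-- _KW = [
--     ('express', 0), ('24jam', 0), ('24 jam', 0), ('kilat', 0),
--     ('karpet', 1), ('gordyn', 1), ('gordin', 1), ('kasur', 1), ('sofa', 1),
--     ('tas', 2), ('bag', 2),
--     ('sepatu', 3), ('shoes', 3), ('shoe', 3),
-- ]
-- _DAYS = {0: 1, 1: 8, 2: 7, 3: 5}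
--
--
-- def get_sla_days(service_name: str) -> int:
--     """Return SLA benchmark in days based on service type keyword."""
--     if not service_name:
--         return 3
--     s = service_name.lower()
--     best = None
--     for i in range(len(s)):
--         for kw, prio in _KW:
--             if (best is None or prio < best) and s.startswith(kw, i):
--                 best = prio
--     return _DAYS.get(best, 3)
-- ===== Notes on version B (the rewrite author's own statement) =====
-- stated objective: alternative
-- what changed: Instead of A's chain of per-tier whole-string substring searches, B makes a single left-to-right scan over the positions of the lowered string, testing with startswith which keywords begin at each position and keeping the minimum tier priority seen, then maps the winning priority to days via a dict at the end (the tier whose days equal the default needs no entries); same asymptotic cost, larger constant in CPython.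
import Mathlib
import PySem

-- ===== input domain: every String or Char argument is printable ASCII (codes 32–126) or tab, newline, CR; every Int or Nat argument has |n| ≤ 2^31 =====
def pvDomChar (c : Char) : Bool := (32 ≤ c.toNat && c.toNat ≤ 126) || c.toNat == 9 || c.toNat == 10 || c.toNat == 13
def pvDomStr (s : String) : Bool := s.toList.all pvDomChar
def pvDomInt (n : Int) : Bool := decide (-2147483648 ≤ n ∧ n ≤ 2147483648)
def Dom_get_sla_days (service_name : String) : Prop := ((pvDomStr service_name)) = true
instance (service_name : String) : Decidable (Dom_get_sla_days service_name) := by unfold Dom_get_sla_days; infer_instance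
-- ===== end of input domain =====

-- B replaces A's chain of per-tier substring searches by ONE left-to-right scan of the
-- lowered string that keeps the minimal tier priority of any keyword starting at each
-- position, mapped to days at the end (alternative algorithm; same asymptotic cost).
-- ===== PORT A =====
def get_sla_days (service_name : String) : Int :=
  if service_name.toList = [] then 3
  else
    let s := PySem.Str.lower service_name
    if (["express", "24jam", "24 jam", "kilat"].any (fun k => PySem.Str.isIn k s)) then 1
    else if (["karpet", "gordyn", "gordin", "kasur", "sofa"].any (fun k => PySem.Str.isIn k s)) then 8
    else if (["tas", "bag"].any (fun k => PySem.Str.isIn k s)) then 7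
    else if (["sepatu", "shoes", "shoe"].any (fun k => PySem.Str.isIn k s)) then 5
    else if (["reguler", "setrika", "laundry"].any (fun k => PySem.Str.isIn k s)) then 3
    else 3

-- ===== PORT B =====
-- _KW : (keyword, tier priority) pairs; keywords kept as code-point lists
def kwTable : List (List Char × Int) :=
  [ ("express".toList, 0), ("24jam".toList, 0), ("24 jam".toList, 0), ("kilat".toList, 0)
  , ("karpet".toList, 1), ("gordyn".toList, 1), ("gordin".toList, 1), ("kasur".toList, 1), ("sofa".toList, 1)
  , ("tas".toList, 2), ("bag".toList, 2)
  , ("sepatu".toList, 3), ("shoes".toList, 3), ("shoe".toList, 3) ]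

-- _DAYS = {0: 1, 1: 8, 2: 7, 3: 5}
def daysDict : PySem.Dict Int Int := PySem.Dict.ofList [(0, 1), (1, 8), (2, 7), (3, 5)]

-- body of the inner 'for kw, prio in _KW' loop at position i
-- (s.startswith(kw, i) with 0 ≤ i < len is exactly kw.toList.isPrefixOf (drop i))
def bestStep (t : List Char) (b : Option Int) (i : Nat) : Option Int :=
  kwTable.foldl
    (fun b e =>
      if (b.elim true (fun q => decide (e.2 < q))) && e.1.isPrefixOf (t.drop i) then some e.2
      else b) b

def get_sla_days_alt (service_name : String) : Int :=
  if service_name.toList = [] then 3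
  else
    let t := (PySem.Str.lower service_name).toList
    -- for i in range(len(s)): ...   (range(n) with n = len ≥ 0 is List.range n)
    match (List.range t.length).foldl (bestStep t) none with
    | none => 3                                  -- _DAYS.get(None, 3): None is never a key
    | some p => PySem.Dict.getD daysDict p 3     -- _DAYS.get(best, 3)

-- ===== PRECONDITION & SPEC =====
def Spec_get_sla_days (service_name : String) (out : Int) : Prop := out = get_sla_days_alt service_name
instance (service_name : String) (out : Int) : Decidable (Spec_get_sla_days service_name out) := by unfold Spec_get_sla_days; infer_instance

-- ===== CLAIM =====
def Claim_equal_get_sla_days : Prop := ∀ (service_name : String), Dom_get_sla_days service_name → Spec_get_sla_days service_name (get_sla_days service_name)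

-- ===== LEMMAS AND PROOFS =====

-- priorities of the keywords that start at position i
def matchPrios (t : List Char) (i : Nat) : List Int :=
  kwTable.filterMap (fun e => if e.1.isPrefixOf (t.drop i) then some e.2 else none)

-- keep-the-smaller accumulator step
def gmin (b : Option Int) (p : Int) : Option Int :=
  if b.elim true (fun q => decide (p < q)) then some p else b

def flatP (t : List Char) : List Int := (List.range t.length).flatMap (matchPrios t)

theorem bestStep_eq_filter (t : List Char) (i : Nat) :
    ∀ (l : List (List Char × Int)) (b : Option Int),
      l.foldl (fun b e =>
          if (b.elim true (fun q => decide (e.2 < q))) && e.1.isPrefixOf (t.drop i) then some e.2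
          else b) b
        = (l.filterMap (fun e => if e.1.isPrefixOf (t.drop i) then some e.2 else none)).foldl gmin b := by
  intro l
  induction l with
  | nil => intro b; rfl
  | cons e l ih =>
    intro b
    by_cases h : e.1.isPrefixOf (t.drop i) = true
    · have hstep : ∀ (bb : Option Int),
          (if ((bb.elim true fun q => decide (e.2 < q)) && e.1.isPrefixOf (t.drop i)) = true
           then some e.2 else bb) = gmin bb e.2 := by
        intro bb; simp [h, gmin]
      simp only [List.foldl_cons, List.filterMap_cons, if_pos h, hstep, ih]
    · have hstep : ∀ (bb : Option Int),
          (if ((bb.elim true fun q => decide (e.2 < q)) && e.1.isPrefixOf (t.drop i)) = true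
           then some e.2 else bb) = bb := by
        intro bb; simp [h]
      simp only [List.foldl_cons, List.filterMap_cons, if_neg h, hstep, ih]

theorem foldl_flatMap_gmin (h : Nat → List Int) :
    ∀ (l : List Nat) (b : Option Int),
      l.foldl (fun b i => (h i).foldl gmin b) b = (l.flatMap h).foldl gmin b := by
  intro l
  induction l with
  | nil => intro b; rfl
  | cons i l ih => intro b; simp [List.flatMap_cons, List.foldl_append, ih]

theorem foldl_gmin_some (l : List Int) : ∀ q, l.foldl gmin (some q) = some (l.foldl min q) := by
  induction l with
  | nil => intro q; rfl
  | cons p l ih =>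
    intro q
    have : gmin (some q) p = some (min q p) := by
      simp only [gmin, Option.elim, decide_eq_true_eq]
      split
      · rename_i h; rw [min_eq_right (le_of_lt h)]
      · rename_i h; rw [min_eq_left (by omega)]
    simp [List.foldl_cons, this, ih]

theorem foldl_gmin_none (l : List Int) : l.foldl gmin none = l.min? := by
  cases l with
  | nil => rfl
  | cons p l => simp [List.foldl_cons, gmin, foldl_gmin_some, List.min?]

theorem b_fold_eq_min? (t : List Char) :
    (List.range t.length).foldl (bestStep t) none = (flatP t).min? := by
  have h1 : bestStep t = fun b i => (matchPrios t i).foldl gmin b := by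
    funext b i; exact bestStep_eq_filter t i kwTable b
  rw [h1, foldl_flatMap_gmin (matchPrios t), foldl_gmin_none]; rfl

theorem kw_nonempty : ∀ e ∈ kwTable, e.1 ≠ ([] : List Char) := by decide

theorem mem_flatP_iff (t : List Char) (p : Int) :
    p ∈ flatP t ↔ ∃ e ∈ kwTable, e.2 = p ∧ PySem.Chars.isIn e.1 t = true := by
  constructor
  · intro hp
    simp only [flatP, List.mem_flatMap, List.mem_range, matchPrios, List.mem_filterMap] at hp
    obtain ⟨j, _, e, he, hif⟩ := hp
    by_cases h : e.1.isPrefixOf (t.drop j) = true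
    · refine ⟨e, he, by simpa [h] using hif, ?_⟩
      exact (PySem.Chars.exists_prefix_drop_iff_isIn e.1 t).mp
        ⟨j, List.isPrefixOf_iff_prefix.mp h⟩
    · simp [h] at hif
  · rintro ⟨e, he, hep, hin⟩
    obtain ⟨j, hj⟩ := (PySem.Chars.exists_prefix_drop_iff_isIn e.1 t).mpr hin
    have hjlt : j < t.length := by
      by_contra hge
      have : t.drop j = [] := List.drop_eq_nil_of_le (by omega)
      rw [this, List.prefix_nil] at hj
      exact kw_nonempty e he hj
    simp only [flatP, List.mem_flatMap, List.mem_range, matchPrios, List.mem_filterMap]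
    exact ⟨j, hjlt, e, he, by simp [List.isPrefixOf_iff_prefix.mpr hj, hep]⟩

theorem flatP_vals (t : List Char) : ∀ p ∈ flatP t, p = 0 ∨ p = 1 ∨ p = 2 ∨ p = 3 := by
  intro p hp
  obtain ⟨e, he, hep, -⟩ := (mem_flatP_iff t p).mp hp
  have : ∀ e ∈ kwTable, e.2 = 0 ∨ e.2 = 1 ∨ e.2 = 2 ∨ e.2 = 3 := by decide
  rcases this e he with h | h | h | h <;> omega

theorem mem_flatP_tier (t : List Char) (p : Int) (ks : List String)
    (hfwd : ∀ k ∈ ks, (k.toList, p) ∈ kwTable)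
    (hbwd : ∀ e ∈ kwTable, e.2 = p → e.1 ∈ ks.map String.toList) :
    p ∈ flatP t ↔ (ks.any (fun k => PySem.Chars.isIn k.toList t)) = true := by
  rw [mem_flatP_iff, List.any_eq_true]
  constructor
  · rintro ⟨e, he, hep, hin⟩
    obtain ⟨k, hk, hke⟩ := List.mem_map.mp (hbwd e he hep)
    exact ⟨k, hk, by rwa [hke]⟩
  · rintro ⟨k, hk, hin⟩
    exact ⟨(k.toList, p), hfwd k hk, rfl, hin⟩

-- ===== VERDICT =====
theorem get_sla_days_spec : Claim_equal_get_sla_days := by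
  intro s _
  unfold Spec_get_sla_days get_sla_days get_sla_days_alt
  by_cases hs : s.toList = []
  · simp [hs]
  · simp only [hs, if_false]
    set t := (PySem.Str.lower s).toList with ht
    rw [b_fold_eq_min?]
    have hisIn : ∀ k : String, PySem.Str.isIn k (PySem.Str.lower s)
        = PySem.Chars.isIn k.toList t := by
      intro k; rw [ht]; simp [PySem.Str.isIn_eq]
    have e0 := mem_flatP_tier t 0 ["express", "24jam", "24 jam", "kilat"] (by decide) (by decide)
    have e1 := mem_flatP_tier t 1 ["karpet", "gordyn", "gordin", "kasur", "sofa"] (by decide) (by decide)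
    have e2 := mem_flatP_tier t 2 ["tas", "bag"] (by decide) (by decide)
    have e3 := mem_flatP_tier t 3 ["sepatu", "shoes", "shoe"] (by decide) (by decide)
    simp only [hisIn]
    by_cases h0 : (["express", "24jam", "24 jam", "kilat"].any (fun k => PySem.Chars.isIn k.toList t)) = true
    · have hmin : (flatP t).min? = some 0 := by
        rw [List.min?_eq_some_iff]
        refine ⟨e0.mpr h0, fun b hb => ?_⟩
        rcases flatP_vals t b hb with h | h | h | h <;> omega
      simp only [h0, hmin, if_true]
      decide
    · by_cases h1 : (["karpet", "gordyn", "gordin", "kasur", "sofa"].any (fun k => PySem.Chars.isIn k.toList t)) = true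
      · have hmin : (flatP t).min? = some 1 := by
          rw [List.min?_eq_some_iff]
          refine ⟨e1.mpr h1, fun b hb => ?_⟩
          have hb0 : b ≠ 0 := fun hb0 => h0 (e0.mp (hb0 ▸ hb))
          rcases flatP_vals t b hb with h | h | h | h <;> omega
        simp only [h0, h1, hmin, Bool.false_eq_true, if_false, if_true]
        decide
      · by_cases h2 : (["tas", "bag"].any (fun k => PySem.Chars.isIn k.toList t)) = true
        · have hmin : (flatP t).min? = some 2 := by
            rw [List.min?_eq_some_iff]
            refine ⟨e2.mpr h2, fun b hb => ?_⟩
            have hb0 : b ≠ 0 := fun hb0 => h0 (e0.mp (hb0 ▸ hb))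
            have hb1 : b ≠ 1 := fun hb1 => h1 (e1.mp (hb1 ▸ hb))
            rcases flatP_vals t b hb with h | h | h | h <;> omega
          simp only [h0, h1, h2, hmin, Bool.false_eq_true, if_false, if_true]
          decide
        · by_cases h3 : (["sepatu", "shoes", "shoe"].any (fun k => PySem.Chars.isIn k.toList t)) = true
          · have hmin : (flatP t).min? = some 3 := by
              rw [List.min?_eq_some_iff]
              refine ⟨e3.mpr h3, fun b hb => ?_⟩
              have hb0 : b ≠ 0 := fun hb0 => h0 (e0.mp (hb0 ▸ hb))
              have hb1 : b ≠ 1 := fun hb1 => h1 (e1.mp (hb1 ▸ hb))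
              have hb2 : b ≠ 2 := fun hb2 => h2 (e2.mp (hb2 ▸ hb))
              rcases flatP_vals t b hb with h | h | h | h <;> omega
            simp only [h0, h1, h2, h3, hmin, Bool.false_eq_true, if_false, if_true]
            decide
          · have hnil : flatP t = [] := by
              rw [List.eq_nil_iff_forall_not_mem]
              intro b hb
              rcases flatP_vals t b hb with h | h | h | h
              · exact h0 (e0.mp (h ▸ hb))
              · exact h1 (e1.mp (h ▸ hb))
              · exact h2 (e2.mp (h ▸ hb))
              · exact h3 (e3.mp (h ▸ hb))
            simp only [h0, h1, h2, h3, hnil, Bool.false_eq_true, if_false, List.min?_nil]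
            split <;> rfl
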